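-- pv_equiv track=rewrite | github.com/Tsomoriri/RadarConvAttention | src/tests/plot.py | shorten_model_name
-- ===== SOURCE A (Python) =====
-- def shorten_model_name(name):
--     name_map = {
--         "convlstm": "CL",
--         "convlstm_attention": "CL-Att",
--         "convlstm_attention_physics": "CL-Att-Phy",
--         "convlstm_attention_physics_dynamicgrid": "CL-Att-Phy-DG"
--     }
--      # Check for exact match or match at the beginning of the string
--     for key, value in name_map.items():
--         if key == name or name.startswith(key + "_"):  # Add underscore check
--             return value
--     return name  # Return original name if no match found
-- ===== SOURCE B (Python) =====
-- def shorten_model_name(name):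
--     # In A only the first dict entry is reachable (later keys all start with
--     # "convlstm_", so any name matching them already matched the first check).
--     if name == "convlstm" or name.startswith("convlstm_"):
--         return "CL"
--     return name
-- ===== Notes on version B (the rewrite author's own statement) =====
-- stated objective: simpler
-- what changed: Replaced the dict-and-loop prefix table with a single conditional: only the first entry of A's table is reachable (any name matching a later key already matches the 'convlstm'/'convlstm_' check), so B returns 'CL' exactly when name == 'convlstm' or name startswith 'convlstm_', else name.
import Mathlib
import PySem

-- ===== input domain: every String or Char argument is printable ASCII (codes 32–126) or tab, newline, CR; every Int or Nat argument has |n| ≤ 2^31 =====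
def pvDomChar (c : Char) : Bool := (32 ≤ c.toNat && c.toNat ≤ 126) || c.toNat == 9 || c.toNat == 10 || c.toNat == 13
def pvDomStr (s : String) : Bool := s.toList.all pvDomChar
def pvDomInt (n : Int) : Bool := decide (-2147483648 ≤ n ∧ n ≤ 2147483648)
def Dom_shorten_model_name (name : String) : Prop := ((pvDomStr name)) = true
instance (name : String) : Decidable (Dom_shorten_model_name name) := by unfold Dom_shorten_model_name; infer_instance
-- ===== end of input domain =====

-- B replaces A's dict-and-loop prefix table with one conditional (only the first table entry is reachable); objective: simpler.

-- ===== PORT A =====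
-- the dict literal, in insertion order
def pvNameMap : List (String × String) :=
  [("convlstm", "CL"),
   ("convlstm_attention", "CL-Att"),
   ("convlstm_attention_physics", "CL-Att-Phy"),
   ("convlstm_attention_physics_dynamicgrid", "CL-Att-Phy-DG")]

-- the 'for key, value in name_map.items(): if … return value' loop
def pvLoopA (name : String) : List (String × String) → String
  | [] => name
  | (key, value) :: rest =>
      if key == name || PySem.Str.startswith name (key ++ "_") then value
      else pvLoopA name rest

def shorten_model_name (name : String) : String := pvLoopA name pvNameMap

-- ===== PORT B =====
def shorten_model_name_alt (name : String) : String :=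
  if name == "convlstm" || PySem.Str.startswith name "convlstm_" then "CL" else name

-- ===== PRECONDITION & SPEC =====
def Spec_shorten_model_name (name : String) (out : String) : Prop := out = shorten_model_name_alt name
instance (name : String) (out : String) : Decidable (Spec_shorten_model_name name out) := by unfold Spec_shorten_model_name; infer_instance

-- ===== CLAIM (what is proved, stated in full; the proofs are below) =====
def Claim_equal_shorten_model_name : Prop := ∀ (name : String), Dom_shorten_model_name name → Spec_shorten_model_name name (shorten_model_name name)

-- ===== LEMMAS AND PROOFS =====

-- a shorter prefix check is implied by a longer one (char-list level)
theorem pv_startswith_mono (s p q : List Char) (hpq : p <+: q)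
    (h : PySem.Chars.startswith s q = true) : PySem.Chars.startswith s p = true := by
  rw [PySem.Chars.startswith_iff] at *
  exact hpq.trans h

-- ===== VERDICT (by name: the statement is the Claim_ definition above) =====
theorem shorten_model_name_spec : Claim_equal_shorten_model_name := by
  intro name _
  unfold Spec_shorten_model_name shorten_model_name shorten_model_name_alt pvNameMap
  simp only [pvLoopA]
  simp only [PySem.Str.startswith_eq] at *
  by_cases h1 : name = "convlstm"
  · subst h1; decide
  by_cases h2 : PySem.Chars.startswith name.toList ['c','o','n','v','l','s','t','m','_'] = true
  · simp [h2]
  · have n2 : ¬ name = "convlstm_attention" := fun h => h2 (by subst h; decide)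
    have n3 : ¬ name = "convlstm_attention_physics" := fun h => h2 (by subst h; decide)
    have n4 : ¬ name = "convlstm_attention_physics_dynamicgrid" := fun h => h2 (by subst h; decide)
    have s2 : ¬ PySem.Chars.startswith name.toList ['c','o','n','v','l','s','t','m','_','a','t','t','e','n','t','i','o','n','_'] = true :=
      fun h => h2 (pv_startswith_mono _ _ _ (by decide) h)
    have s3 : ¬ PySem.Chars.startswith name.toList ['c','o','n','v','l','s','t','m','_','a','t','t','e','n','t','i','o','n','_','p','h','y','s','i','c','s','_'] = true :=
      fun h => h2 (pv_startswith_mono _ _ _ (by decide) h)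
    have s4 : ¬ PySem.Chars.startswith name.toList ['c','o','n','v','l','s','t','m','_','a','t','t','e','n','t','i','o','n','_','p','h','y','s','i','c','s','_','d','y','n','a','m','i','c','g','r','i','d','_'] = true :=
      fun h => h2 (pv_startswith_mono _ _ _ (by decide) h)
    simp [h1, h2, Ne.symm n2, Ne.symm n3, Ne.symm n4, s2, s3, s4]
    exact fun h => absurd h.symm h1
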